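-- pv_equiv track=rewrite | github.com/caizhanjin/deepseg | tools/translator.py | translate_more
-- ===== SOURCE A (Python) =====
-- def translate(src_list, tag_list):
--     if not src_list or not tag_list:
--         return False, None
--     if len(src_list) != len(tag_list):
--         return False, None
--     result = src_list.copy()
--     for _i in range(len(tag_list)):
--         if tag_list[_i].lower() == "e" or tag_list[_i].lower() == "s":
--             result[_i] += " "
--         else:
--             pass
--     return True, "".join(result).strip()
--
-- def translate_more(src_lists, tag_lists):
--     if not src_lists or not tag_lists:
--         raise Exception("Source lists or Tag lists is None !")
--     if len(src_lists) != len(tag_lists):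
--         raise Exception(" The length of source lists is not equal to tag lists !")
--     result = []
--     for src_list, tag_list in zip(src_lists, tag_lists):
--         _b, _s = translate(src_list, tag_list)
--         result.append(_s)
--     return result
-- ===== SOURCE B (Python) =====
-- def _segment(src_list, tag_list):
--     if not src_list or not tag_list or len(src_list) != len(tag_list):
--         return None
--     words = []
--     buf = ""
--     for tok, tag in zip(src_list, tag_list):
--         buf += tok
--         if tag.lower() in ("e", "s"):
--             words.append(buf)
--             buf = ""
--     if buf:
--         words.append(buf)
--     return " ".join(words).strip()
--
-- def translate_more(src_lists, tag_lists):
--     if not src_lists or not tag_lists: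
--         raise Exception("Source lists or Tag lists is None !")
--     if len(src_lists) != len(tag_lists):
--         raise Exception(" The length of source lists is not equal to tag lists !")
--     return [_segment(s, t) for s, t in zip(src_lists, tag_lists)]
-- ===== Notes on version B (the rewrite author's own statement) =====
-- stated objective: alternative
-- what changed: Instead of copying the token list and appending a trailing space after each e/s-tagged token before one big join, B walks each sentence once maintaining a current-word buffer and a words list, flushing the buffer on e/s tags, and joins the completed words with a single-space separator.
import Mathlib
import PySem

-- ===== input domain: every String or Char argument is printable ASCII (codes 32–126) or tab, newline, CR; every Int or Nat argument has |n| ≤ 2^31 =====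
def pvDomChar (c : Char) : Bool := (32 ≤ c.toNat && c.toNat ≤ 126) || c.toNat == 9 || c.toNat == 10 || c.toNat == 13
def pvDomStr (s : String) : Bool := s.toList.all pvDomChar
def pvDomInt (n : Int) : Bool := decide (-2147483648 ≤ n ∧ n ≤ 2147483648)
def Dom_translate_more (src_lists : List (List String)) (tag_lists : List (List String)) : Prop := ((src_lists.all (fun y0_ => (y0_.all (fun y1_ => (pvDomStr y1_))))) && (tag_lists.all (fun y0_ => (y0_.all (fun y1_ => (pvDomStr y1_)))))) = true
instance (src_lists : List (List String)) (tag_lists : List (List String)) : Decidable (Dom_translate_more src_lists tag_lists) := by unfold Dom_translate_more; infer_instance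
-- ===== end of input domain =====

-- B replaces A's inner "append a trailing space after each e/s token, concatenate, strip" pass by a single
-- pass maintaining a current-word buffer flushed into a words list on e/s tags, joined by " " and stripped;
-- same cost, different decomposition.

-- ===== PORT A =====
def pvEsA (t : String) : Bool := PySem.Str.lower t == "e" || PySem.Str.lower t == "s"

-- loop body of A's 'for _i in range(len(tag_list))'; indices i satisfy 0 ≤ i < len, so Nat set/getD indexing is exact
def pvStepA (tag_list : List String) (res : List String) (i : Nat) : List String :=
  if pvEsA (tag_list.getD i "") then res.set i (res.getD i "" ++ " ") else res

def pvTranslate (src_list tag_list : List String) : Bool × Option String :=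
  if src_list.isEmpty || tag_list.isEmpty then (false, none)
  else if src_list.length ≠ tag_list.length then (false, none)
  else
    let result := (List.range tag_list.length).foldl (pvStepA tag_list) src_list
    (true, some (PySem.Str.strip (PySem.Str.join "" result)))

def translate_more (src_lists : List (List String)) (tag_lists : List (List String)) : List (Option String) :=
  (src_lists.zip tag_lists).foldl (fun acc p => acc ++ [(pvTranslate p.1 p.2).2]) []

-- ===== PORT B =====
def pvEsB (t : String) : Bool := ["e", "s"].contains (PySem.Str.lower t)

-- loop body of B's buffer/words pass
def pvStepB (st : List String × String) (p : String × String) : List String × String :=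
  let buf := st.2 ++ p.1
  if pvEsB p.2 then (st.1 ++ [buf], "") else (st.1, buf)

def pvSegment (src_list tag_list : List String) : Option String :=
  if src_list.isEmpty || tag_list.isEmpty || src_list.length ≠ tag_list.length then none
  else
    let st := (src_list.zip tag_list).foldl pvStepB ([], "")
    let words := if st.2 ≠ "" then st.1 ++ [st.2] else st.1
    some (PySem.Str.strip (PySem.Str.join " " words))

def translate_more_alt (src_lists : List (List String)) (tag_lists : List (List String)) : List (Option String) :=
  (src_lists.zip tag_lists).map (fun p => pvSegment p.1 p.2)

-- ===== PRECONDITION & SPEC =====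
-- A raises Exception exactly when either outer list is empty or the outer lengths differ; Pre_ excludes those inputs.
def Pre_translate_more (src_lists : List (List String)) (tag_lists : List (List String)) : Prop :=
  src_lists ≠ [] ∧ tag_lists ≠ [] ∧ src_lists.length = tag_lists.length
instance (src_lists : List (List String)) (tag_lists : List (List String)) : Decidable (Pre_translate_more src_lists tag_lists) := by unfold Pre_translate_more; infer_instance

def pvWitness_translate_more : List (List String) × List (List String) := ([["ab", "c"], []], [["e", "x"], []])

def Spec_translate_more (src_lists : List (List String)) (tag_lists : List (List String)) (out : List (Option String)) : Prop := out = translate_more_alt src_lists tag_lists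
instance (src_lists : List (List String)) (tag_lists : List (List String)) (out : List (Option String)) : Decidable (Spec_translate_more src_lists tag_lists out) := by unfold Spec_translate_more; infer_instance

-- ===== CLAIM (what is proved, stated in full; the proofs are below) =====
def Claim_equal_translate_more : Prop := ∀ (src_lists : List (List String)) (tag_lists : List (List String)), Dom_translate_more src_lists tag_lists → Pre_translate_more src_lists tag_lists → Spec_translate_more src_lists tag_lists (translate_more src_lists tag_lists)

-- ===== LEMMAS AND PROOFS =====

-- A's per-token transformation, extracted
def pvF (p : String × String) : String := if pvEsA p.2 then p.1 ++ " " else p.1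

-- A's joined string over a token/tag list (as a char list)
def pvSA (zs : List (String × String)) : List Char := (zs.map (fun p => (pvF p).toList)).flatten

-- B's join of the finished words for a loop state (as a char list)
def pvSig (st : List String × String) : List Char :=
  PySem.Chars.join [' '] ((if st.2 ≠ "" then st.1 ++ [st.2] else st.1).map String.toList)

-- the trailing space A has but B's join does not, depending on the state
def pvTail (st : List String × String) : List Char := if st.2 = "" ∧ st.1 ≠ [] then [' '] else []

lemma pv_es_eq (t : String) : pvEsB t = pvEsA t := by
  simp only [pvEsA, pvEsB, List.contains_cons, List.contains_nil, Bool.or_false]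

lemma pv_join_nil_sep (l : List (List Char)) : PySem.Chars.join [] l = l.flatten := by
  induction l with
  | nil => simp [PySem.Chars.join_nil]
  | cons a t ih =>
    cases t with
    | nil => simp [PySem.Chars.join, List.intercalate]
    | cons b t' => rw [PySem.Chars.join_cons_cons]; simp_all

lemma pv_join_append (ws : List (List Char)) (w : List Char) (h : ws ≠ []) :
    PySem.Chars.join [' '] (ws ++ [w]) = PySem.Chars.join [' '] ws ++ [' '] ++ w := by
  induction ws with
  | nil => simp at h
  | cons a t ih =>
    cases t with
    | nil => simp [PySem.Chars.join, List.intercalate]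
    | cons b t' =>
      have h1 : a :: b :: t' ++ [w] = a :: ((b :: t') ++ [w]) := by simp
      have h2 : (b :: t') ++ [w] = b :: (t' ++ [w]) := rfl
      rw [h1, h2, PySem.Chars.join_cons_cons]
      rw [← h2, ih (by simp), PySem.Chars.join_cons_cons]
      simp

lemma pv_rstrip_space (y : List Char) : PySem.Chars.rstrip (y ++ [' ']) = PySem.Chars.rstrip y := by
  simp [PySem.Chars.rstrip, PySem.Chars.isspace]

lemma pv_strip_space (y : List Char) : PySem.Chars.strip (y ++ [' ']) = PySem.Chars.strip y := by
  simp only [PySem.Chars.strip, PySem.Chars.lstrip, List.dropWhile_append]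
  by_cases h : (List.dropWhile PySem.Chars.isspace y).isEmpty
  · simp [PySem.Chars.rstrip, PySem.Chars.isspace, List.isEmpty_iff.mp h]
  · simp [h, pv_rstrip_space]

lemma pv_stepB_eq (st : List String × String) (p : String × String) :
    pvSig (pvStepB st p) ++ pvTail (pvStepB st p) = pvSig st ++ pvTail st ++ (pvF p).toList := by
  obtain ⟨ws, b⟩ := st
  simp only [pvStepB, pvF, pv_es_eq]
  by_cases he : pvEsA p.2 = true
  · simp only [he, if_pos]
    by_cases hb : b = ""
    · subst hb
      by_cases hw : ws = []
      · subst hw; simp [pvSig, pvTail, PySem.Chars.join, List.intercalate]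
      · simp [pvSig, pvTail, hw, pv_join_append (List.map String.toList ws) _ (by simpa using hw)]
    · by_cases hw : ws = []
      · subst hw; simp [pvSig, pvTail, hb, PySem.Chars.join, List.intercalate]
      · simp [pvSig, pvTail, hb, hw, pv_join_append (List.map String.toList ws) _ (by simpa using hw)]
  · simp only [he, if_neg, Bool.not_eq_true]
    by_cases hb : b = ""
    · subst hb
      by_cases hs : p.1 = ""
      · simp [pvSig, pvTail, hs]
      · by_cases hw : ws = []
        · subst hw; simp [pvSig, pvTail, hs, PySem.Chars.join, List.intercalate]
        · simp [pvSig, pvTail, hs, hw, pv_join_append (List.map String.toList ws) _ (by simpa using hw)]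
    · have hbs : b ++ p.1 ≠ "" := by
        intro hc
        apply hb
        have h0 := congrArg String.toList hc
        simp at h0
        exact h0.1
      by_cases hw : ws = []
      · subst hw; simp [pvSig, pvTail, hb, hbs, PySem.Chars.join, List.intercalate]
      · simp [pvSig, pvTail, hb, hbs, hw, pv_join_append (List.map String.toList ws) _ (by simpa using hw)]

lemma pv_inv (zs : List (String × String)) (st : List String × String) :
    pvSig (zs.foldl pvStepB st) ++ pvTail (zs.foldl pvStepB st)
      = pvSig st ++ pvTail st ++ pvSA zs := by
  induction zs generalizing st with
  | nil => simp [pvSA]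
  | cons p t ih =>
    rw [List.foldl_cons, ih, pv_stepB_eq]
    simp [pvSA, List.append_assoc]

lemma pv_aloop (src tag : List String) (h : src.length = tag.length) (k : Nat) (hk : k ≤ src.length) :
    (List.range k).foldl (pvStepA tag) src
      = ((src.zip tag).take k).map pvF ++ src.drop k := by
  induction k with
  | zero => simp
  | succ k ih =>
    have hk' : k < src.length := hk
    have ihk := ih (Nat.le_of_lt hk')
    rw [List.range_succ, List.foldl_append, ihk]
    simp only [List.foldl_cons, List.foldl_nil]
    have hzlen : (src.zip tag).length = src.length := by simp [h]
    have hpre : (((src.zip tag).take k).map pvF).length = k := by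
      simp [hzlen]; omega
    have hdrop : src.drop k = src[k] :: src.drop (k + 1) := List.drop_eq_getElem_cons hk'
    have htag : tag.getD k "" = tag[k]'(h ▸ hk') := List.getD_eq_getElem tag "" (h ▸ hk')
    have htake : (src.zip tag).take (k + 1) = (src.zip tag).take k ++ [(src[k], tag[k]'(h ▸ hk'))] := by
      rw [List.take_add_one]
      congr 1
      rw [List.getElem?_eq_getElem (by omega : k < (src.zip tag).length)]
      simp
    unfold pvStepA
    rw [htag, htake]
    by_cases he : pvEsA (tag[k]'(h ▸ hk')) = true
    · rw [if_pos he, hdrop]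
      rw [List.getD_append_right _ _ _ _ hpre.le]
      rw [List.set_append_right _ _ hpre.le]
      rw [hpre, Nat.sub_self]
      simp only [List.getD_cons_zero, List.set_cons_zero, List.map_append, List.map_cons,
        List.map_nil]
      have hf : pvF (src[k]'hk', tag[k]'(h ▸ hk')) = src[k]'hk' ++ " " := by
        unfold pvF; exact if_pos he
      rw [hf]; simp
    · rw [if_neg he, hdrop, List.map_append]
      simp only [List.map_cons, List.map_nil]
      have hf : pvF (src[k]'hk', tag[k]'(h ▸ hk')) = src[k]'hk' := by
        unfold pvF; exact if_neg he
      rw [hf]; simp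

lemma pv_pointwise (src tag : List String) : (pvTranslate src tag).2 = pvSegment src tag := by
  unfold pvTranslate pvSegment
  by_cases h1 : src.isEmpty
  · simp [h1]
  · by_cases h2 : tag.isEmpty
    · simp [h1, h2]
    · by_cases h3 : src.length = tag.length
      · have hzlen : (src.zip tag).length = src.length := by simp [h3]
        have hloop := pv_aloop src tag h3 tag.length h3.ge
        have htake : (src.zip tag).take tag.length = src.zip tag :=
          List.take_of_length_le (by omega)
        have hdropnil : src.drop tag.length = [] := by simp [← h3]
        rw [htake, hdropnil, List.append_nil] at hloop
        rw [if_neg (show ¬((src.isEmpty || tag.isEmpty) = true) by simp [h1, h2]),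
            if_neg (show ¬(src.length ≠ tag.length) from fun hn => hn h3),
            if_neg (show ¬((src.isEmpty || tag.isEmpty || decide (src.length ≠ tag.length)) = true) by
              simp [h1, h2, h3])]
        dsimp only
        rw [hloop]
        refine congrArg some (String.toList_inj.mp ?_)
        rw [PySem.Str.toList_strip, PySem.Str.toList_strip]
        have hA : (PySem.Str.join "" ((src.zip tag).map pvF)).toList = pvSA (src.zip tag) := by
          rw [PySem.Str.toList_join]
          simp only [List.map_map]
          simp [pv_join_nil_sep, pvSA, Function.comp_def]
        have hB : ∀ st : List String × String,
            (PySem.Str.join " " (if st.2 ≠ "" then st.1 ++ [st.2] else st.1)).toList = pvSig st := by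
          intro st
          rw [PySem.Str.toList_join]
          simp [pvSig]
        rw [hA, hB]
        have hinv := pv_inv (src.zip tag) ([], "")
        have hinit : pvSig (([], "") : List String × String) = [] := by
          simp [pvSig, PySem.Chars.join_nil]
        have hinitT : pvTail (([], "") : List String × String) = [] := by
          simp [pvTail]
        rw [hinit, hinitT] at hinv
        simp only [List.nil_append] at hinv
        rw [← hinv]
        set st := ((src.zip tag).foldl pvStepB ([], "")) with hst
        by_cases ht : st.2 = "" ∧ st.1 ≠ []
        · simp only [pvTail, if_pos ht, pv_strip_space]
        · simp only [pvTail, if_neg ht, List.append_nil]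
      · simp [h1, h2, h3]

-- ===== VERDICT (by name: the statement is the Claim_ definition above) =====
theorem translate_more_spec : Claim_equal_translate_more := by
  intro src_lists tag_lists _ _
  unfold Spec_translate_more translate_more translate_more_alt
  rw [PySem.List.foldl_append_singleton_eq_map]
  simp only [List.nil_append]
  exact List.map_congr_left (fun p _ => pv_pointwise p.1 p.2)
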